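-- pv_equiv track=rewrite | github.com/TheSimilier/advent-of-code-2024-solutions | Day_2/main.py | recursiveCheck
-- ===== SOURCE A (Python) =====
-- def recursiveCheck(prevNumber, numbers, remainingPasses, ascending) -> bool:
--     if len(numbers) == 0:
--         return True
--     nextNumber = numbers.pop()
--     delta = nextNumber - prevNumber
--     if ascending and delta > 0 and delta <= 3:
--         return recursiveCheck(nextNumber, numbers[:], remainingPasses, ascending)
--     elif ascending and remainingPasses > 0:
--         return recursiveCheck(prevNumber, numbers[:], (remainingPasses-1), ascending)
--     elif ascending:
--         return False
--     elif delta < 0 and delta >= -3: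
--         return recursiveCheck(nextNumber, numbers[:], remainingPasses, ascending)
--     elif remainingPasses > 0:
--         return recursiveCheck(prevNumber, numbers[:], (remainingPasses-1), ascending)
--     return False
-- ===== SOURCE B (Python) =====
-- def recursiveCheck(prevNumber, numbers, remainingPasses, ascending) -> bool:
--     # Single pass over the list back-to-front; no recursion, no list copying.
--     # Note: A pops one element from the caller's list; B does not mutate
--     # (equivalence is about the return value).
--     prev = prevNumber
--     passes = remainingPasses
--     for x in reversed(numbers):
--         d = x - prev
--         if (ascending and 0 < d <= 3) or (not ascending and -3 <= d < 0):
--             prev = x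
--         elif passes > 0:
--             passes -= 1
--         else:
--             return False
--     return True
-- ===== Notes on version B (the rewrite author's own statement) =====
-- stated objective: faster
-- what changed: Replaced the recursion that copies the remaining list at every step with a single iterative back-to-front pass keeping only (prev, passes) state.
import Mathlib
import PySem

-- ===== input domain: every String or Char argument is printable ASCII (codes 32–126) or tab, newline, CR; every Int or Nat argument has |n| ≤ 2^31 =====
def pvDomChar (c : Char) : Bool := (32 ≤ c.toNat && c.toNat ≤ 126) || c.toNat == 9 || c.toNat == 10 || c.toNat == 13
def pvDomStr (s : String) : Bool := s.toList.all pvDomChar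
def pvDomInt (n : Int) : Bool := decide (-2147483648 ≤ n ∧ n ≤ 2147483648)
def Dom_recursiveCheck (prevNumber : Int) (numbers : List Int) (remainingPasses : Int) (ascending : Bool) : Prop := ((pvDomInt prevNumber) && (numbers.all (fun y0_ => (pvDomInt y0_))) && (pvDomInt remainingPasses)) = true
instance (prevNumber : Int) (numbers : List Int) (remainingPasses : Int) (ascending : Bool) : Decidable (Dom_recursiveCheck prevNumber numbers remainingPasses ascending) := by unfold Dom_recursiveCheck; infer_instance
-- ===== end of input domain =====

-- B replaces A's list-copying recursion by one iterative back-to-front pass (faster);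
-- A pops one element from the caller's list, B does not mutate: equivalence is about the return value.

-- ===== PORT A =====
-- literal port of A: pop the last element, recurse on the rest (Python's numbers[:] copy is value-identity here)
def recursiveCheck (prevNumber : Int) (numbers : List Int) (remainingPasses : Int) (ascending : Bool) : Bool :=
  if h : numbers.length = 0 then true
  else
    let nextNumber := numbers.getLast (by simp_all [List.length_eq_zero_iff])
    let rest := numbers.dropLast
    let delta := nextNumber - prevNumber
    if ascending && decide (delta > 0) && decide (delta ≤ 3) then
      recursiveCheck nextNumber rest remainingPasses ascending
    else if ascending && decide (remainingPasses > 0) then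
      recursiveCheck prevNumber rest (remainingPasses - 1) ascending
    else if ascending then false
    else if decide (delta < 0) && decide (delta ≥ -3) then
      recursiveCheck nextNumber rest remainingPasses ascending
    else if decide (remainingPasses > 0) then
      recursiveCheck prevNumber rest (remainingPasses - 1) ascending
    else false
termination_by numbers.length
decreasing_by
  all_goals simp [List.length_dropLast]; omega

-- ===== PORT B =====
-- the loop body of B: walk the reversed list keeping only (prev, passes)
def rcLoop (prev : Int) (passes : Int) (ascending : Bool) : List Int → Bool
  | [] => true
  | x :: rest =>
    let d := x - prev
    if (ascending && decide (0 < d) && decide (d ≤ 3)) ||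
       (!ascending && decide (-3 ≤ d) && decide (d < 0)) then
      rcLoop x passes ascending rest
    else if decide (passes > 0) then
      rcLoop prev (passes - 1) ascending rest
    else false

def recursiveCheck_alt (prevNumber : Int) (numbers : List Int) (remainingPasses : Int) (ascending : Bool) : Bool :=
  rcLoop prevNumber remainingPasses ascending numbers.reverse

-- ===== PRECONDITION & SPEC =====
def Spec_recursiveCheck (prevNumber : Int) (numbers : List Int) (remainingPasses : Int) (ascending : Bool) (out : Bool) : Prop := out = recursiveCheck_alt prevNumber numbers remainingPasses ascending
instance (prevNumber : Int) (numbers : List Int) (remainingPasses : Int) (ascending : Bool) (out : Bool) : Decidable (Spec_recursiveCheck prevNumber numbers remainingPasses ascending out) := by unfold Spec_recursiveCheck; infer_instance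

-- ===== CLAIM (what is proved, stated in full; the proofs are below) =====
def Claim_equal_recursiveCheck : Prop := ∀ (prevNumber : Int) (numbers : List Int) (remainingPasses : Int) (ascending : Bool), Dom_recursiveCheck prevNumber numbers remainingPasses ascending → Spec_recursiveCheck prevNumber numbers remainingPasses ascending (recursiveCheck prevNumber numbers remainingPasses ascending)

-- ===== LEMMAS AND PROOFS =====

-- A on l.reverse equals B's loop on l: induction on l; each A step on a reversed
-- list peels exactly the head of l, and A's five branches collapse to B's three.
lemma rc_reverse (l : List Int) : ∀ (prev passes : Int) (asc : Bool),
    recursiveCheck prev l.reverse passes asc = rcLoop prev passes asc l := by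
  induction l with
  | nil => intro prev passes asc; simp [recursiveCheck, rcLoop]
  | cons x rest ih =>
    intro prev passes asc
    rw [recursiveCheck]
    have hdrop : (x :: rest).reverse.dropLast = rest.reverse := by
      simp [List.reverse_cons]
    have hlast : ∀ (h : (x :: rest).reverse ≠ []), (x :: rest).reverse.getLast h = x := by
      intro h
      have h2 : (x :: rest).reverse.getLast? = some x := by
        rw [List.reverse_cons]; exact List.getLast?_concat
      rwa [List.getLast?_eq_some_getLast h, Option.some_inj] at h2
    rw [rcLoop]
    simp only [hlast, hdrop, ih]
    cases asc with
    | true =>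
      by_cases h1 : 0 < x - prev ∧ x - prev ≤ 3
      · simp [h1.2]
      · have : ¬ (0 < x - prev) ∨ ¬ (x - prev ≤ 3) := by tauto
        by_cases hp : passes > 0 <;>
          rcases this with h | h <;> simp [h, hp]
    | false =>
      by_cases h1 : -3 ≤ x - prev ∧ x - prev < 0
      · simp [h1.2]
      · have : ¬ (-3 ≤ x - prev) ∨ ¬ (x - prev < 0) := by tauto
        by_cases hp : passes > 0 <;>
          rcases this with h | h <;> simp [h, hp]

-- ===== VERDICT (by name: the statement is the Claim_ definition above) =====
theorem recursiveCheck_spec : Claim_equal_recursiveCheck := by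
  intro prev numbers passes asc _
  unfold Spec_recursiveCheck recursiveCheck_alt
  calc recursiveCheck prev numbers passes asc
      = recursiveCheck prev numbers.reverse.reverse passes asc := by rw [List.reverse_reverse]
    _ = rcLoop prev passes asc numbers.reverse := rc_reverse _ _ _ _
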